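-- pv_equiv track=rewrite | github.com/kitae104/New_Python | DataStructure/Sequences/combination.py | conbinations
-- ===== SOURCE A (Python) =====
-- def conbinations(s):
--     if len(s) < 2:
--         return s
--     res = []
--     for i, c in enumerate(s):
--         res.append(c)
--         for j in conbinations(s[:i] + s[i+1:]):
--             res.append(c + j)
--     return res
-- ===== SOURCE B (Python) =====
-- def conbinations(s):
--     if len(s) < 2:
--         return s
--     res = []
--     stack = [(s[i], s[:i] + s[i+1:]) for i in range(len(s) - 1, -1, -1)]
--     while stack:
--         p, rem = stack.pop()
--         res.append(p)
--         for i in range(len(rem) - 1, -1, -1):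
--             stack.append((p + rem[i], rem[:i] + rem[i+1:]))
--     return res
-- ===== Notes on version B (the rewrite author's own statement) =====
-- stated objective: alternative
-- what changed: Replaces A's recursive build (each prefix recomputed by a recursive call whose results are re-prefixed) with an iterative preorder DFS over an explicit stack of (prefix, remaining-characters) states, pushing children in reverse index order so the emission order is identical.
-- outside the precondition, e.g. on conbinations('a'): A returns 'a', B returns 'a'
import Mathlib
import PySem

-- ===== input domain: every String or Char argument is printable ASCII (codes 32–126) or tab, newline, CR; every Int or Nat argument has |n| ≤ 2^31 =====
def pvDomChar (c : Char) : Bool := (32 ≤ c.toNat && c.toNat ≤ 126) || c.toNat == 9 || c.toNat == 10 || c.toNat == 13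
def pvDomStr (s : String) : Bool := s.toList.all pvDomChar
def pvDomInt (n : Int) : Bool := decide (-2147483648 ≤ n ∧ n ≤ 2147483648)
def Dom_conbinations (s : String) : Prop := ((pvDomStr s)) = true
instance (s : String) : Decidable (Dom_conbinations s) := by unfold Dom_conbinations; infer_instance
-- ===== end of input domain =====

-- B replaces A's recursion with an explicit-stack preorder DFS (same outputs, same order); len<2 inputs
-- are excluded by Pre_ because there A/B return the bare string, not a list.


-- ===== PORT A =====
-- s[:i] + s[i+1:] (0 ≤ i < len): exact for in-range i
def pvRemove (cs : List Char) (i : Nat) : List Char := cs.take i ++ cs.drop (i + 1)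

-- termination helper for the recursive call of A (cited by decreasing_by)
theorem pvRemove_length_lt (cs : List Char) (i : Nat) (h : i < cs.length) :
    (pvRemove cs i).length < cs.length := by
  simp [pvRemove]; omega

-- literal port of A; `return s` for len(s) < 2 is the string seen as its characters
-- (that is exactly how the caller's `for j in conbinations(...)` consumes it)
def conbA (cs : List Char) : List String :=
  if cs.length < 2 then cs.map (fun c => String.ofList [c])
  else
    (List.range cs.length).attach.foldl
      (fun res x =>
        (conbA (pvRemove cs x.1)).foldl
          (fun r j => r ++ [String.ofList [cs.getD x.1 ' '] ++ j])
          (res ++ [String.ofList [cs.getD x.1 ' ']]))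
      []
termination_by cs.length
decreasing_by exact pvRemove_length_lt cs x.1 (List.mem_range.mp x.2)

def conbinations (s : String) : List String := conbA s.toList

-- ===== PORT B =====
-- stack measure for termination of the DFS loop
def pvStackMeasure (st : List (String × List Char)) : Nat :=
  (st.map (fun q => (q.2.length + 1).factorial)).sum

theorem pvRemove_length (cs : List Char) (i : Nat) (h : i < cs.length) :
    (pvRemove cs i).length = cs.length - 1 := by
  simp [pvRemove]; omega

-- pushing a state's children strictly shrinks the measure (cited by decreasing_by)
theorem pvDfs_measure (p : String) (rem : List Char) (rest : List (String × List Char)) :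
    pvStackMeasure
      ((List.range rem.length).map
        (fun i => (p ++ String.ofList [rem.getD i ' '], pvRemove rem i)) ++ rest)
      < pvStackMeasure ((p, rem) :: rest) := by
  simp only [pvStackMeasure, List.map_append, List.sum_append, List.map_map, List.map_cons,
    List.sum_cons]
  have h1 : (List.range rem.length).map
      ((fun q : String × List Char => (q.2.length + 1).factorial) ∘
        (fun i => (p ++ String.ofList [rem.getD i ' '], pvRemove rem i)))
      = List.replicate rem.length rem.length.factorial := by
    rw [List.eq_replicate_iff]
    refine ⟨by simp, ?_⟩
    intro b hb
    simp only [List.mem_map, List.mem_range] at hb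
    obtain ⟨i, hi, hb⟩ := hb
    rw [← hb]
    simp only [Function.comp_apply]
    rw [pvRemove_length rem i hi]
    congr 1
    omega
  rw [h1, List.sum_replicate, smul_eq_mul]
  have h2 : rem.length * rem.length.factorial < (rem.length + 1).factorial := by
    rw [Nat.factorial_succ]
    exact (Nat.mul_lt_mul_right rem.length.factorial_pos).mpr (Nat.lt_succ_self _)
  omega

-- the while-loop of B: pop a state, emit its prefix, push its children in reverse index
-- order (so the leftmost child is on top); the stack's head is its top
def conbDfs : List (String × List Char) → List String → List String
  | [], res => res
  | (p, rem) :: rest, res =>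
      conbDfs
        ((List.range rem.length).map
          (fun i => (p ++ String.ofList [rem.getD i ' '], pvRemove rem i)) ++ rest)
        (res ++ [p])
termination_by st _ => pvStackMeasure st
decreasing_by exact pvDfs_measure p rem rest

-- port of B; `return s` for len(s) < 2 is the string seen as its characters
def conbinations_alt (s : String) : List String :=
  if s.toList.length < 2 then s.toList.map (fun c => String.ofList [c])
  else
    conbDfs
      ((List.range s.toList.length).map
        (fun i => (String.ofList [s.toList.getD i ' '], pvRemove s.toList i)))
      []

-- ===== PRECONDITION & SPEC =====
-- Pre_ excludes len(s) < 2, where A (and B) `return s`: a str, not the declared list of strings.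
def Pre_conbinations (s : String) : Prop := 2 ≤ s.toList.length
instance (s : String) : Decidable (Pre_conbinations s) := by unfold Pre_conbinations; infer_instance

def pvWitness_conbinations : String := "ab"

def Spec_conbinations (s : String) (out : List String) : Prop := out = conbinations_alt s
instance (s : String) (out : List String) : Decidable (Spec_conbinations s out) := by unfold Spec_conbinations; infer_instance

-- ===== CLAIM (what is proved, stated in full; the proofs are below) =====
def Claim_equal_conbinations : Prop := ∀ (s : String), Dom_conbinations s → Pre_conbinations s → Spec_conbinations s (conbinations s)

-- ===== LEMMAS AND PROOFS =====

-- the subtree emitted from one stack state, in preorder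
def pvTreeList (q : String × List Char) : List String :=
  q.1 :: (conbA q.2).map (fun j => q.1 ++ j)

theorem foldl_snoc_map (g : String → String) (ys : List String) (a : List String) :
    ys.foldl (fun r j => r ++ [g j]) a = a ++ ys.map g := by
  induction ys generalizing a with
  | nil => simp
  | cons y ys ih => simp [ih]

theorem foldl_flatMap {α : Type} (f : α → String) (g : α → List String) (l : List α)
    (init : List String) :
    l.foldl (fun res x => (g x).foldl (fun r j => r ++ [f x ++ j]) (res ++ [f x])) init
      = init ++ l.flatMap (fun x => f x :: (g x).map (fun j => f x ++ j)) := by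
  induction l generalizing init with
  | nil => simp
  | cons x xs ih =>
      rw [List.foldl_cons, foldl_snoc_map, ih]
      simp [List.flatMap_cons]

-- A's loop characterised as a flatMap over the index range
theorem conbA_eq (cs : List Char) (h : 2 ≤ cs.length) :
    conbA cs = (List.range cs.length).flatMap
      (fun i => String.ofList [cs.getD i ' '] ::
        (conbA (pvRemove cs i)).map (fun j => String.ofList [cs.getD i ' '] ++ j)) := by
  rw [conbA, if_neg (by omega)]
  rw [List.foldl_attach (f := fun res i =>
    (conbA (pvRemove cs i)).foldl
      (fun r j => r ++ [String.ofList [cs.getD i ' '] ++ j])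
      (res ++ [String.ofList [cs.getD i ' ']]))]
  simpa using foldl_flatMap (fun i => String.ofList [cs.getD i ' ']) (fun i => conbA (pvRemove cs i))
    (List.range cs.length) []

theorem conbA_nil : conbA [] = [] := by rw [conbA]; simp

theorem conbA_single (c : Char) : conbA [c] = [String.ofList [c]] := by rw [conbA]; simp

-- the children of a state emit exactly the parent's A-list, re-prefixed
theorem pvChildren_flatMap (p : String) (rem : List Char) :
    ((List.range rem.length).map
        (fun i => (p ++ String.ofList [rem.getD i ' '], pvRemove rem i))).flatMap pvTreeList
      = (conbA rem).map (fun j => p ++ j) := by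
  match rem with
  | [] => simp [conbA_nil]
  | [c] =>
      simp [pvTreeList, pvRemove, conbA_nil, conbA_single]
  | a :: b :: t =>
      rw [conbA_eq (a :: b :: t) (by simp)]
      rw [List.flatMap_map]
      rw [List.map_flatMap]
      apply List.flatMap_congr  -- pointwise
      intro i _
      simp [pvTreeList, Function.comp, List.map_map, String.append_assoc]

-- DFS invariant: the loop emits the preorder of every stacked subtree, after res
theorem conbDfs_eq (st : List (String × List Char)) (res : List String) :
    conbDfs st res = res ++ st.flatMap pvTreeList := by
  fun_induction conbDfs st res with
  | case1 res => simp
  | case2 p rem rest res ih =>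
      rw [ih]
      simp only [List.flatMap_append, List.flatMap_cons, pvChildren_flatMap]
      simp [pvTreeList]

-- ===== VERDICT (by name: the statement is the Claim_ definition above) =====
theorem conbinations_spec : Claim_equal_conbinations := by
  intro s _ hpre
  unfold Spec_conbinations conbinations conbinations_alt
  rw [if_neg (by unfold Pre_conbinations at hpre; omega)]
  rw [conbDfs_eq]
  rw [conbA_eq s.toList hpre]
  rw [List.flatMap_map]
  simp [pvTreeList]
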